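-- pv_equiv track=rewrite | github.com/r9y9/nlp100 | 08.py | ciper
-- ===== SOURCE A (Python) =====
-- def ciper(s):
--     r = []
--     for c in s:
--         n = ord(c)
--         if n >= ord("a") and n <= ord("z"):
--             r.append(chr(219 - n))
--         else:
--             r.append(c)
--     return "".join(r)
-- ===== SOURCE B (Python) =====
-- ALPHABET = "abcdefghijklmnopqrstuvwxyz"
--
--
-- def ciper(s):
--     # Scan s as alternating maximal runs: a lowercase run is rewritten by
--     # indexing the reflected position in ALPHABET; the following non-lowercase
--     # run is copied over verbatim as one slice.
--     pieces = []
--     i, n = 0, len(s)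
--     while i < n:
--         j = i
--         while j < n and "a" <= s[j] <= "z":
--             j += 1
--         pieces.append("".join(ALPHABET[122 - ord(c)] for c in s[i:j]))
--         i = j
--         while i < n and not ("a" <= s[i] <= "z"):
--             i += 1
--         pieces.append(s[j:i])
--     return "".join(pieces)
-- ===== Notes on version B (the rewrite author's own statement) =====
-- stated objective: alternative
-- what changed: B scans the string as alternating maximal runs (a lowercase run mapped by indexing the reflected position of a literal alphabet string, then the following non-lowercase run copied verbatim as one slice), replacing A's per-character if/else loop with 219-ord arithmetic.
import Mathlib
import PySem

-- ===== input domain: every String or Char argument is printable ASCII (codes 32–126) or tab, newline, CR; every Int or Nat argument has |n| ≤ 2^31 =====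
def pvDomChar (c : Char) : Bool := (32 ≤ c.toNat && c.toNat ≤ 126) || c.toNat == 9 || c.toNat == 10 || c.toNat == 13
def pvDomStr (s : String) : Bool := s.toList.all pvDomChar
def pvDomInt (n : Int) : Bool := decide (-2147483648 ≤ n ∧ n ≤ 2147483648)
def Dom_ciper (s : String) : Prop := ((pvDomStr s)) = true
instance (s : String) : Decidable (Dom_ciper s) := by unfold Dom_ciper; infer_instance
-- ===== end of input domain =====

-- B rewrites the string by maximal runs (lowercase run mapped through a reflected
-- index into an alphabet string, the following non-lowercase run copied as a slice)
-- instead of A's per-character if/else loop; objective: alternative.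

-- ===== PORT A =====
-- literal port: loop over s appending chr(219-ord(c)) for lowercase c, else c; join
def ciper (s : String) : String :=
  let r := s.toList.foldl
    (fun r c =>
      let n : Int := c.toNat
      if 97 ≤ n ∧ n ≤ 122 then r ++ [Char.ofNat (219 - n).toNat] else r ++ [c])
    []
  String.ofList r

-- ===== PORT B =====
def pvAlpha : List Char := "abcdefghijklmnopqrstuvwxyz".toList

-- "a" <= c <= "z"
def pvLow (c : Char) : Bool := 97 ≤ c.toNat && c.toNat ≤ 122

-- ALPHABET[122 - ord(c)]; the index is always in range when c is lowercase
def pvMap (c : Char) : Char :=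
  match PySem.List.pyGet? pvAlpha (122 - (c.toNat : Int)) with
  | some d => d
  | none => c

-- each step of the run scan strictly shrinks the remaining suffix (cited by the
-- port's decreasing_by)
theorem pvRuns_dec (c : Char) (rest : List Char) :
    (List.dropWhile (fun d => !pvLow d) (List.dropWhile pvLow (c :: rest))).length
      < (c :: rest).length := by
  by_cases h : pvLow c = true
  · rw [List.dropWhile_cons_of_pos h]
    have h1 := List.length_dropWhile_le pvLow rest
    have h2 := List.length_dropWhile_le (fun d => !pvLow d) (List.dropWhile pvLow rest)
    simp only [List.length_cons]; omega
  · rw [List.dropWhile_cons_of_neg h, List.dropWhile_cons_of_pos (by simpa using h)]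
    have h2 := List.length_dropWhile_le (fun d => !pvLow d) rest
    simp only [List.length_cons]; omega

-- the alternating-run scan of Source B: take the maximal lowercase run, map it through
-- the alphabet lookup, then copy the following maximal non-lowercase run verbatim
def ciperRuns (l : List Char) : List Char :=
  match l with
  | [] => []
  | c :: rest =>
    let run := (c :: rest).takeWhile pvLow
    let r1 := (c :: rest).dropWhile pvLow
    let keep := r1.takeWhile (fun d => !pvLow d)
    let r2 := r1.dropWhile (fun d => !pvLow d)
    run.map pvMap ++ keep ++ ciperRuns r2
termination_by l.length
decreasing_by exact pvRuns_dec c rest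

def ciper_alt (s : String) : String := String.ofList (ciperRuns s.toList)

-- ===== PRECONDITION & SPEC =====
def Spec_ciper (s : String) (out : String) : Prop := out = ciper_alt s
instance (s : String) (out : String) : Decidable (Spec_ciper s out) := by unfold Spec_ciper; infer_instance

-- ===== CLAIM (what is proved, stated in full; the proofs are below) =====
def Claim_equal_ciper : Prop := ∀ (s : String), Dom_ciper s → Spec_ciper s (ciper s)

-- ===== LEMMAS AND PROOFS =====

-- A's per-character step, as a one-char-to-fragment function
def pvStepA (c : Char) : List Char :=
  if 97 ≤ (c.toNat : Int) ∧ (c.toNat : Int) ≤ 122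
    then [Char.ofNat ((219 - (c.toNat : Int))).toNat] else [c]

theorem pyGet?_alpha (n : Nat) (h1 : 97 ≤ n) (h2 : n ≤ 122) :
    PySem.List.pyGet? pvAlpha (122 - (n : Int)) = some (Char.ofNat (219 - n)) := by
  interval_cases n <;> decide

theorem pvMap_low (c : Char) (h : pvLow c = true) :
    [pvMap c] = pvStepA c := by
  have hb : 97 ≤ c.toNat ∧ c.toNat ≤ 122 := by
    simpa [pvLow] using h
  unfold pvMap pvStepA
  rw [pyGet?_alpha c.toNat hb.1 hb.2]
  have hi : (97 : Int) ≤ (c.toNat : Int) ∧ (c.toNat : Int) ≤ 122 :=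
    ⟨by exact_mod_cast hb.1, by exact_mod_cast hb.2⟩
  rw [if_pos hi]
  have : ((219 - (c.toNat : Int))).toNat = 219 - c.toNat := by omega
  rw [this]

theorem pvStepA_high (c : Char) (h : pvLow c = false) : pvStepA c = [c] := by
  unfold pvStepA
  rw [if_neg]
  intro hc
  simp only [pvLow, Bool.and_eq_false_iff] at h
  rcases h with h | h <;> simp at h <;> omega

theorem flatMap_low (m : List Char) (h : ∀ x ∈ m, pvLow x = true) :
    m.flatMap pvStepA = m.map pvMap := by
  induction m with
  | nil => rfl
  | cons c t ih =>
    simp only [List.flatMap_cons, List.map_cons]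
    rw [← pvMap_low c (h c (List.mem_cons_self)), ih (fun x hx => h x (List.mem_cons_of_mem _ hx))]
    rfl
theorem flatMap_high (m : List Char) (h : ∀ x ∈ m, pvLow x = false) :
    m.flatMap pvStepA = m := by
  induction m with
  | nil => rfl
  | cons c t ih =>
    simp only [List.flatMap_cons]
    rw [pvStepA_high c (h c (List.mem_cons_self)), ih (fun x hx => h x (List.mem_cons_of_mem _ hx))]
    rfl

theorem runs_step (c : Char) (rest : List Char)
    (hrec : ciperRuns (List.dropWhile (fun d => !pvLow d) (List.dropWhile pvLow (c :: rest)))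
      = (List.dropWhile (fun d => !pvLow d) (List.dropWhile pvLow (c :: rest))).flatMap pvStepA) :
    ciperRuns (c :: rest) = (c :: rest).flatMap pvStepA := by
  rw [ciperRuns]
  have hrun : ∀ x ∈ List.takeWhile pvLow (c :: rest), pvLow x = true :=
    fun x hx => List.mem_takeWhile_imp hx
  have hkeep : ∀ x ∈ List.takeWhile (fun d => !pvLow d) (List.dropWhile pvLow (c :: rest)),
      pvLow x = false := fun x hx => by simpa using List.mem_takeWhile_imp hx
  calc (List.takeWhile pvLow (c :: rest)).map pvMap
        ++ List.takeWhile (fun d => !pvLow d) (List.dropWhile pvLow (c :: rest))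
        ++ ciperRuns (List.dropWhile (fun d => !pvLow d) (List.dropWhile pvLow (c :: rest)))
      = (List.takeWhile pvLow (c :: rest)).flatMap pvStepA
        ++ (List.takeWhile (fun d => !pvLow d) (List.dropWhile pvLow (c :: rest))).flatMap pvStepA
        ++ (List.dropWhile (fun d => !pvLow d) (List.dropWhile pvLow (c :: rest))).flatMap pvStepA := by
        rw [flatMap_low _ hrun, flatMap_high _ hkeep, hrec]
    _ = ((List.takeWhile pvLow (c :: rest))
          ++ (List.takeWhile (fun d => !pvLow d) (List.dropWhile pvLow (c :: rest))
          ++ List.dropWhile (fun d => !pvLow d) (List.dropWhile pvLow (c :: rest)))).flatMap pvStepA := by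
        rw [List.flatMap_append, List.flatMap_append, List.append_assoc]
    _ = (c :: rest).flatMap pvStepA := by
        rw [List.takeWhile_append_dropWhile, List.takeWhile_append_dropWhile]

theorem ciperRuns_eq_bounded : ∀ (k : Nat) (l : List Char), l.length ≤ k →
    ciperRuns l = l.flatMap pvStepA := by
  intro k
  induction k with
  | zero =>
    intro l hl
    have : l = [] := List.eq_nil_of_length_eq_zero (Nat.le_zero.mp hl)
    subst this
    rw [ciperRuns]; rfl
  | succ k ih =>
    intro l hl
    cases l with
    | nil => rw [ciperRuns]; rfl
    | cons c rest =>
      refine runs_step c rest (ih _ ?_)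
      have := pvRuns_dec c rest
      simp only [List.length_cons] at hl this ⊢
      omega

theorem ciperRuns_eq (l : List Char) : ciperRuns l = l.flatMap pvStepA :=
  ciperRuns_eq_bounded l.length l le_rfl

theorem ciper_foldl_eq (l : List Char) :
    l.foldl
      (fun r c =>
        let n : Int := c.toNat
        if 97 ≤ n ∧ n ≤ 122 then r ++ [Char.ofNat (219 - n).toNat] else r ++ [c])
      []
    = l.flatMap pvStepA := by
  have hf : (fun (r : List Char) (c : Char) =>
        let n : Int := c.toNat
        if 97 ≤ n ∧ n ≤ 122 then r ++ [Char.ofNat (219 - n).toNat] else r ++ [c])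
      = fun (r : List Char) (c : Char) => r ++ pvStepA c := by
    funext r c
    show (if 97 ≤ (c.toNat : Int) ∧ (c.toNat : Int) ≤ 122
            then r ++ [Char.ofNat ((219 - (c.toNat : Int))).toNat] else r ++ [c]) = _
    unfold pvStepA
    split_ifs <;> rfl
  rw [hf]
  simpa using PySem.List.foldl_append_eq_flatMap (g := pvStepA) (l := l) (acc := ([] : List Char))

-- ===== VERDICT (by name: the statement is the Claim_ definition above) =====
theorem ciper_spec : Claim_equal_ciper := by
  intro s _
  unfold Spec_ciper ciper ciper_alt
  rw [ciper_foldl_eq, ciperRuns_eq]
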